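-- pv_equiv track=rewrite | github.com/makoban/house_search | server/crawler.py | _is_non_html
-- ===== SOURCE A (Python) =====
-- def _is_non_html(url):
--     """Check if URL points to a non-HTML resource."""
--     non_html_extensions = [
--         '.pdf', '.jpg', '.jpeg', '.png', '.gif', '.svg', '.webp',
--         '.mp4', '.mp3', '.zip', '.doc', '.docx', '.xls', '.xlsx',
--         '.css', '.js', '.ico', '.woff', '.woff2', '.ttf', '.eot'
--     ]
--     lower = url.lower()
--     return any(lower.endswith(ext) for ext in non_html_extensions)
-- ===== SOURCE B (Python) =====
-- _NON_HTML_EXTS = {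
--     'pdf', 'jpg', 'jpeg', 'png', 'gif', 'svg', 'webp',
--     'mp4', 'mp3', 'zip', 'doc', 'docx', 'xls', 'xlsx',
--     'css', 'js', 'ico', 'woff', 'woff2', 'ttf', 'eot'
-- }
--
--
-- def _is_non_html(url):
--     """Check if URL points to a non-HTML resource."""
--     head, sep, tail = url.lower().rpartition('.')
--     return sep == '.' and tail in _NON_HTML_EXTS
-- ===== Notes on version B (the rewrite author's own statement) =====
-- stated objective: idiomatic
-- what changed: Instead of scanning the URL once per extension with endswith, B splits off the final dotted segment once via str.rpartition and does a single set-membership lookup.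
import Mathlib
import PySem

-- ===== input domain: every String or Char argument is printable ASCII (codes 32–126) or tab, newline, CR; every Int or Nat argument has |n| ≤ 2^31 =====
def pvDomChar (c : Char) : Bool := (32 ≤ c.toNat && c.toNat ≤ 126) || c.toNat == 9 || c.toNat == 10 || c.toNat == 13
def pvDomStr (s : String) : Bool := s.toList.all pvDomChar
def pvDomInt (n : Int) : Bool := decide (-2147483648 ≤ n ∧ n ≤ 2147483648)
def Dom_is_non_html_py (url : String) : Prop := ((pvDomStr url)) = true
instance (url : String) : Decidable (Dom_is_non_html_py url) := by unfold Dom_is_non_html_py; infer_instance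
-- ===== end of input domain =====

-- B replaces A's per-extension endswith scan by one rpartition extraction of the final dotted segment plus a single set lookup (idiomatic; return value identical).

-- ===== PORT A =====
def is_non_html_py (url : String) : Bool :=
  let non_html_extensions : List String :=
    [".pdf", ".jpg", ".jpeg", ".png", ".gif", ".svg", ".webp",
     ".mp4", ".mp3", ".zip", ".doc", ".docx", ".xls", ".xlsx",
     ".css", ".js", ".ico", ".woff", ".woff2", ".ttf", ".eot"]
  let lower := PySem.Str.lower url
  non_html_extensions.any (fun ext => PySem.Str.endswith lower ext)

-- ===== PORT B =====
-- hand port of Python's str.rpartition with a dot separator (exact: splits at the LAST '.'; middle Bool = separator found;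
-- when no '.' occurs Python returns ('', '', s), here ([], false, s))
def rpartitionDot (s : List Char) : List Char × Bool × List Char :=
  match s.reverse.dropWhile (fun c => c ≠ '.') with
  | [] => ([], false, s)
  | _ :: rest => (rest.reverse, true, (s.reverse.takeWhile (fun c => c ≠ '.')).reverse)

def is_non_html_py_alt (url : String) : Bool :=
  let extset : PySem.Set String := PySem.Set.ofList
    ["pdf", "jpg", "jpeg", "png", "gif", "svg", "webp",
     "mp4", "mp3", "zip", "doc", "docx", "xls", "xlsx",
     "css", "js", "ico", "woff", "woff2", "ttf", "eot"]
  let r := rpartitionDot (PySem.Str.lower url).toList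
  r.2.1 && PySem.Set.contains extset (String.ofList r.2.2)

-- ===== PRECONDITION & SPEC =====
def Spec_is_non_html_py (url : String) (out : Bool) : Prop := out = is_non_html_py_alt url
instance (url : String) (out : Bool) : Decidable (Spec_is_non_html_py url out) := by unfold Spec_is_non_html_py; infer_instance

-- ===== CLAIM (what is proved, stated in full; the proofs are below) =====
def Claim_equal_is_non_html_py : Prop := ∀ (url : String), Dom_is_non_html_py url → Spec_is_non_html_py url (is_non_html_py url)

-- ===== LEMMAS AND PROOFS =====

-- a dot-free word followed by '.' is a prefix of r iff r contains a dot and its dot-free initial segment is exactly w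
lemma prefix_dot_takeWhile (w : List Char) (hw : '.' ∉ w) :
    ∀ r : List Char, ((w ++ ['.']) <+: r ↔ ('.' ∈ r ∧ r.takeWhile (fun c => c ≠ '.') = w)) := by
  intro r
  induction r generalizing w with
  | nil => simp
  | cons c r ih =>
    by_cases hc : c = '.'
    · subst hc
      cases w with
      | nil => simp [List.takeWhile]
      | cons a w' =>
        have ha : a ≠ '.' := fun h => hw (by simp [h])
        simp [List.cons_prefix_cons, List.takeWhile, ha]
    · cases w with
      | nil => simp [List.cons_prefix_cons, hc, List.takeWhile, Ne.symm hc]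
      | cons a w' =>
        have hw' : '.' ∉ w' := fun h => hw (by simp [h])
        have ihw := ih w' hw'
        constructor
        · intro h
          rcases (List.cons_prefix_cons.mp h) with ⟨rfl, h2⟩
          rcases ihw.mp h2 with ⟨h3, h4⟩
          refine ⟨by simp [h3], ?_⟩
          simpa [List.takeWhile, hc] using h4
        · rintro ⟨h1, h2⟩
          rw [List.takeWhile_cons_of_pos (by simp [hc])] at h2
          rcases List.cons_eq_cons.mp h2 with ⟨rfl, h4⟩
          have h3 : '.' ∈ r := by
            rcases List.mem_cons.mp h1 with h | h
            · exact absurd h.symm hc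
            · exact h
          exact List.cons_prefix_cons.mpr ⟨rfl, ihw.mpr ⟨h3, by simpa using h4⟩⟩

-- A's per-extension test, characterised through the last-dot segment
lemma endswith_dot_ext (l x : List Char) (hx : '.' ∉ x) :
    PySem.Chars.endswith l ('.' :: x) =
      (decide ('.' ∈ l) && (l.reverse.takeWhile (fun c => c ≠ '.') == x.reverse)) := by
  have hx' : '.' ∉ x.reverse := by simpa using hx
  have h := prefix_dot_takeWhile x.reverse hx' l.reverse
  have h2 : (('.' :: x) <:+ l) ↔ ('.' ∈ l ∧ l.reverse.takeWhile (fun c => c ≠ '.') = x.reverse) := by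
    rw [← List.reverse_prefix, List.reverse_cons, h, List.mem_reverse]
  rw [Bool.eq_iff_iff, PySem.Chars.endswith_iff, h2]
  simp

lemma rpart_no_dot (l : List Char) (h : '.' ∉ l) : rpartitionDot l = ([], false, l) := by
  unfold rpartitionDot
  have hnil : List.dropWhile (fun c => decide (c ≠ '.')) l.reverse = [] := by
    rw [List.dropWhile_eq_nil_iff]
    intro x hx
    have hmem : x ∈ l := List.mem_reverse.mp hx
    have hne : x ≠ '.' := fun he => h (he ▸ hmem)
    simp [hne]
  rw [hnil]

lemma rpart_dot (l : List Char) (h : '.' ∈ l) :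
    (rpartitionDot l).2.1 = true ∧
    (rpartitionDot l).2.2 = (l.reverse.takeWhile (fun c => c ≠ '.')).reverse := by
  unfold rpartitionDot
  have hne : l.reverse.dropWhile (fun c => c ≠ '.') ≠ [] := by
    rw [Ne, List.dropWhile_eq_nil_iff]
    intro hall
    have := hall '.' (by simpa using h)
    simp at this
  cases hd : l.reverse.dropWhile (fun c => c ≠ '.') with
  | nil => exact absurd hd hne
  | cons a rest => simp

lemma beq_eq_decide_list (a b : List Char) : (a == b) = decide (a = b) := by
  rw [Bool.eq_iff_iff]; simp

-- membership of a built string in the concrete extension set, as membership of its char list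
lemma contains_map_ofList (t : List Char) (xs : List (List Char)) :
    (xs.map String.ofList).contains (String.ofList t) = xs.contains t := by
  induction xs with
  | nil => simp
  | cons y ys ih => simp [String.ofList_inj]

lemma contains_extset (t : List Char) :
    PySem.Set.contains (PySem.Set.ofList
      ["pdf", "jpg", "jpeg", "png", "gif", "svg", "webp",
       "mp4", "mp3", "zip", "doc", "docx", "xls", "xlsx",
       "css", "js", "ico", "woff", "woff2", "ttf", "eot"]) (String.ofList t) =
      (["pdf".toList, "jpg".toList, "jpeg".toList, "png".toList, "gif".toList, "svg".toList,
        "webp".toList, "mp4".toList, "mp3".toList, "zip".toList, "doc".toList, "docx".toList,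
        "xls".toList, "xlsx".toList, "css".toList, "js".toList, "ico".toList, "woff".toList,
        "woff2".toList, "ttf".toList, "eot".toList] : List (List Char)).contains t := by
  rw [show PySem.Set.ofList
      ["pdf", "jpg", "jpeg", "png", "gif", "svg", "webp",
       "mp4", "mp3", "zip", "doc", "docx", "xls", "xlsx",
       "css", "js", "ico", "woff", "woff2", "ttf", "eot"] =
      ["pdf", "jpg", "jpeg", "png", "gif", "svg", "webp",
       "mp4", "mp3", "zip", "doc", "docx", "xls", "xlsx",
       "css", "js", "ico", "woff", "woff2", "ttf", "eot"] from by decide]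
  rw [show (["pdf", "jpg", "jpeg", "png", "gif", "svg", "webp",
       "mp4", "mp3", "zip", "doc", "docx", "xls", "xlsx",
       "css", "js", "ico", "woff", "woff2", "ttf", "eot"] : List String) =
      (["pdf".toList, "jpg".toList, "jpeg".toList, "png".toList, "gif".toList, "svg".toList,
        "webp".toList, "mp4".toList, "mp3".toList, "zip".toList, "doc".toList, "docx".toList,
        "xls".toList, "xlsx".toList, "css".toList, "js".toList, "ico".toList, "woff".toList,
        "woff2".toList, "ttf".toList, "eot".toList] : List (List Char)).map String.ofList from by decide]
  rw [show PySem.Set.contains = fun (s : PySem.Set String) (x : String) => s.contains x from rfl]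
  exact contains_map_ofList t _

-- ===== VERDICT (by name: the statement is the Claim_ definition above) =====
theorem is_non_html_py_spec : Claim_equal_is_non_html_py := by
  intro url _
  unfold Spec_is_non_html_py is_non_html_py is_non_html_py_alt
  set l := (PySem.Str.lower url).toList with hl
  by_cases hd : '.' ∈ l
  · obtain ⟨hs, ht⟩ := rpart_dot l hd
    simp only [List.any_cons, List.any_nil, hs, ht, Bool.true_and, contains_extset]
    have he : ∀ x : List Char, '.' ∉ x →
        PySem.Str.endswith (PySem.Str.lower url) (String.ofList ('.' :: x)) =
          (l.reverse.takeWhile (fun c => c ≠ '.') == x.reverse) := by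
      intro x hx
      rw [PySem.Str.endswith_eq, String.toList_ofList, ← hl, endswith_dot_ext l x hx]
      simp [hd]
    rw [show (".pdf" : String) = String.ofList ('.' :: "pdf".toList) from rfl,
        show (".jpg" : String) = String.ofList ('.' :: "jpg".toList) from rfl,
        show (".jpeg" : String) = String.ofList ('.' :: "jpeg".toList) from rfl,
        show (".png" : String) = String.ofList ('.' :: "png".toList) from rfl,
        show (".gif" : String) = String.ofList ('.' :: "gif".toList) from rfl,
        show (".svg" : String) = String.ofList ('.' :: "svg".toList) from rfl,
        show (".webp" : String) = String.ofList ('.' :: "webp".toList) from rfl,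
        show (".mp4" : String) = String.ofList ('.' :: "mp4".toList) from rfl,
        show (".mp3" : String) = String.ofList ('.' :: "mp3".toList) from rfl,
        show (".zip" : String) = String.ofList ('.' :: "zip".toList) from rfl,
        show (".doc" : String) = String.ofList ('.' :: "doc".toList) from rfl,
        show (".docx" : String) = String.ofList ('.' :: "docx".toList) from rfl,
        show (".xls" : String) = String.ofList ('.' :: "xls".toList) from rfl,
        show (".xlsx" : String) = String.ofList ('.' :: "xlsx".toList) from rfl,
        show (".css" : String) = String.ofList ('.' :: "css".toList) from rfl,
        show (".js" : String) = String.ofList ('.' :: "js".toList) from rfl,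
        show (".ico" : String) = String.ofList ('.' :: "ico".toList) from rfl,
        show (".woff" : String) = String.ofList ('.' :: "woff".toList) from rfl,
        show (".woff2" : String) = String.ofList ('.' :: "woff2".toList) from rfl,
        show (".ttf" : String) = String.ofList ('.' :: "ttf".toList) from rfl,
        show (".eot" : String) = String.ofList ('.' :: "eot".toList) from rfl]
    rw [he _ (by decide), he _ (by decide), he _ (by decide), he _ (by decide),
        he _ (by decide), he _ (by decide), he _ (by decide), he _ (by decide),
        he _ (by decide), he _ (by decide), he _ (by decide), he _ (by decide),
        he _ (by decide), he _ (by decide), he _ (by decide), he _ (by decide),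
        he _ (by decide), he _ (by decide), he _ (by decide), he _ (by decide),
        he _ (by decide)]
    simp [beq_eq_decide_list, List.reverse_eq_iff, List.contains_eq_mem]
  · rw [rpart_no_dot l hd]
    have he : ∀ x : List Char, '.' ∉ x →
        PySem.Str.endswith (PySem.Str.lower url) (String.ofList ('.' :: x)) = false := by
      intro x hx
      rw [PySem.Str.endswith_eq, String.toList_ofList, ← hl, endswith_dot_ext l x hx]
      simp [hd]
    simp only [List.any_cons, List.any_nil, Bool.false_and]
    rw [show (".pdf" : String) = String.ofList ('.' :: "pdf".toList) from rfl,
        show (".jpg" : String) = String.ofList ('.' :: "jpg".toList) from rfl,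
        show (".jpeg" : String) = String.ofList ('.' :: "jpeg".toList) from rfl,
        show (".png" : String) = String.ofList ('.' :: "png".toList) from rfl,
        show (".gif" : String) = String.ofList ('.' :: "gif".toList) from rfl,
        show (".svg" : String) = String.ofList ('.' :: "svg".toList) from rfl,
        show (".webp" : String) = String.ofList ('.' :: "webp".toList) from rfl,
        show (".mp4" : String) = String.ofList ('.' :: "mp4".toList) from rfl,
        show (".mp3" : String) = String.ofList ('.' :: "mp3".toList) from rfl,
        show (".zip" : String) = String.ofList ('.' :: "zip".toList) from rfl,
        show (".doc" : String) = String.ofList ('.' :: "doc".toList) from rfl,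
        show (".docx" : String) = String.ofList ('.' :: "docx".toList) from rfl,
        show (".xls" : String) = String.ofList ('.' :: "xls".toList) from rfl,
        show (".xlsx" : String) = String.ofList ('.' :: "xlsx".toList) from rfl,
        show (".css" : String) = String.ofList ('.' :: "css".toList) from rfl,
        show (".js" : String) = String.ofList ('.' :: "js".toList) from rfl,
        show (".ico" : String) = String.ofList ('.' :: "ico".toList) from rfl,
        show (".woff" : String) = String.ofList ('.' :: "woff".toList) from rfl,
        show (".woff2" : String) = String.ofList ('.' :: "woff2".toList) from rfl,
        show (".ttf" : String) = String.ofList ('.' :: "ttf".toList) from rfl,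
        show (".eot" : String) = String.ofList ('.' :: "eot".toList) from rfl]
    rw [he _ (by decide), he _ (by decide), he _ (by decide), he _ (by decide),
        he _ (by decide), he _ (by decide), he _ (by decide), he _ (by decide),
        he _ (by decide), he _ (by decide), he _ (by decide), he _ (by decide),
        he _ (by decide), he _ (by decide), he _ (by decide), he _ (by decide),
        he _ (by decide), he _ (by decide), he _ (by decide), he _ (by decide),
        he _ (by decide)]
    simp
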